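-- pv_equiv track=rewrite | github.com/emsibt/EPI_Python | array/dutch_flag_partition/main.py | verify_partition
-- ===== SOURCE A (Python) =====
-- def verify_partition(arr: list, pivot_value: int) -> bool:
--     """
--     Verify that array is correctly partitioned around pivot value.
--
--     Args:
--         arr: Partitioned array
--         pivot_value: The pivot value used for partitioning
--
--     Returns:
--         True if correctly partitioned, False otherwise
--     """
--     if not arr:
--         return True
--
--     i = 0
--     # Check all elements < pivot
--     while i < len(arr) and arr[i] < pivot_value:
--         i += 1
--
--     # Check all elements == pivot
--     while i < len(arr) and arr[i] == pivot_value: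
--         i += 1
--
--     # Check all elements > pivot
--     while i < len(arr):
--         if arr[i] <= pivot_value:
--             return False
--         i += 1
--
--     return True
-- ===== SOURCE B (Python) =====
-- def verify_partition(arr: list, pivot_value: int) -> bool:
--     """Zone-code check: classify each element (0: <pivot, 1: ==pivot, 2: >pivot)
--     and verify the zone sequence is non-decreasing in one pass."""
--     z = 0
--     for x in arr:
--         zx = 0 if x < pivot_value else (1 if x == pivot_value else 2)
--         if zx < z:
--             return False
--         z = zx
--     return True
-- ===== Notes on version B (the rewrite author's own statement) =====
-- stated objective: simpler
-- what changed: Replaces the three sequential while-loops over an index with a single pass that maps each element to a zone code (0/1/2) and checks the codes are non-decreasing.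
import Mathlib
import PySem

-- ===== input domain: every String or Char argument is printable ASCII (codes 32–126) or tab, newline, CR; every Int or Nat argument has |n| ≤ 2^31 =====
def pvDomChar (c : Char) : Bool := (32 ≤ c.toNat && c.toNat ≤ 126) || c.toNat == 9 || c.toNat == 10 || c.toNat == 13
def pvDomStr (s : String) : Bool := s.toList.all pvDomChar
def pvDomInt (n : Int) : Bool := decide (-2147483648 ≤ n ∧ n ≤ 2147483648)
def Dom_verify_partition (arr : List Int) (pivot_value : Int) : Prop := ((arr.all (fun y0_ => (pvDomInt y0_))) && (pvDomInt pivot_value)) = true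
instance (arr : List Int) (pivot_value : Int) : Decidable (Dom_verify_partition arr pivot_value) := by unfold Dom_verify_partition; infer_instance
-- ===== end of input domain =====

-- ===== PORT A =====
-- verify_partition: A's three sequential while-loops, each ported as structural recursion on the list suffix
def phase3A (p : Int) : List Int → Bool
  | [] => true
  | x :: xs => if x ≤ p then false else phase3A p xs

def phase2A (p : Int) : List Int → Bool
  | [] => true
  | x :: xs => if x = p then phase2A p xs else phase3A p (x :: xs)

def phase1A (p : Int) : List Int → Bool
  | [] => true
  | x :: xs => if x < p then phase1A p xs else phase2A p (x :: xs)

def verify_partition (arr : List Int) (pivot_value : Int) : Bool :=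
  if arr = [] then true else phase1A pivot_value arr

-- ===== PORT B =====
-- verify_partition_alt: B's single pass carrying the zone of the previous element
def zoneGo (p : Int) (z : Int) : List Int → Bool
  | [] => true
  | x :: xs =>
    let zx : Int := if x < p then 0 else if x = p then 1 else 2
    if zx < z then false else zoneGo p zx xs

def verify_partition_alt (arr : List Int) (pivot_value : Int) : Bool :=
  zoneGo pivot_value 0 arr

-- ===== PRECONDITION & SPEC =====
def Spec_verify_partition (arr : List Int) (pivot_value : Int) (out : Bool) : Prop := out = verify_partition_alt arr pivot_value
instance (arr : List Int) (pivot_value : Int) (out : Bool) : Decidable (Spec_verify_partition arr pivot_value out) := by unfold Spec_verify_partition; infer_instance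

-- ===== CLAIM (what is proved, stated in full; the proofs are below) =====
def Claim_equal_verify_partition : Prop := ∀ (arr : List Int) (pivot_value : Int), Dom_verify_partition arr pivot_value → Spec_verify_partition arr pivot_value (verify_partition arr pivot_value)

-- ===== LEMMAS AND PROOFS =====


theorem phase3A_eq (p : Int) (xs : List Int) : phase3A p xs = zoneGo p 2 xs := by
  induction xs with
  | nil => rfl
  | cons x xs ih =>
    simp only [phase3A, zoneGo]
    by_cases h1 : x < p
    · simp [h1, show x ≤ p by omega]
    · by_cases h2 : x = p
      · simp [h1, h2]
      · simp [h1, h2, show ¬ x ≤ p by omega, ih]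

theorem phase2A_eq (p : Int) (xs : List Int) : phase2A p xs = zoneGo p 1 xs := by
  induction xs with
  | nil => rfl
  | cons x xs ih =>
    simp only [phase2A, zoneGo]
    by_cases h2 : x = p
    · simp [h2, ih]
    · by_cases h1 : x < p
      · simp [phase3A, h1, h2, show x ≤ p by omega]
      · simp [phase3A, h1, h2, show ¬ x ≤ p by omega, phase3A_eq]

theorem phase1A_eq (p : Int) (xs : List Int) : phase1A p xs = zoneGo p 0 xs := by
  induction xs with
  | nil => rfl
  | cons x xs ih =>
    simp only [phase1A, zoneGo]
    by_cases h1 : x < p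
    · simp [h1, ih]
    · by_cases h2 : x = p
      · simp [phase2A, h2, phase2A_eq]
      · simp [phase2A, phase3A, h1, h2, show ¬ x ≤ p by omega, phase3A_eq]

-- ===== VERDICT (by name: the statement is the Claim_ definition above) =====
theorem verify_partition_spec : Claim_equal_verify_partition := by
  intro arr p _
  unfold Spec_verify_partition verify_partition verify_partition_alt
  split
  · subst arr; rfl
  · exact phase1A_eq p arr
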